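-- pv_equiv track=rewrite | github.com/AgnesChauke/python-challenge-001 | bracket_validator.py | bracket_validator
-- ===== SOURCE A (Python) =====
-- def bracket_validator(input_string):
--     stack = []
--     opening_brackets = "([{"
--     closing_brackets = ")]}"
--
--
--     bracket_map = {
--         ')': '(',
--         ']': '[',
--         '}': '{'
--     }
--
--     for char in input_string:
--         if char in opening_brackets:
--             stack.append(char)
--         elif char in closing_brackets:
--             if not stack:
--                 return False
--
--             last_open_bracket = stack.pop()
--             if last_open_bracket != bracket_map[char]:
--                 return False
--
--     return not stack
-- ===== SOURCE B (Python) =====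
-- def bracket_validator(input_string):
--     pairs = {('(', ')'), ('[', ']'), ('{', '}')}
--     def collapse(s):
--         out = []
--         i = 0
--         while i < len(s):
--             if i + 1 < len(s) and (s[i], s[i+1]) in pairs:
--                 i += 2
--             else:
--                 out.append(s[i])
--                 i += 1
--         return out
--     s = [c for c in input_string if c in "()[]{}"]
--     while True:
--         t = collapse(s)
--         if t == s:
--             return not s
--         s = t
-- ===== Notes on version B (the rewrite author's own statement) =====
-- stated objective: alternative
-- what changed: Replaced the explicit push/pop stack scan by a repeated-reduction validator: filter to bracket characters, then repeatedly cancel adjacent matching pairs in a single left-to-right pass until a fixpoint; the string is valid iff the fixpoint is empty.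
import Mathlib
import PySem

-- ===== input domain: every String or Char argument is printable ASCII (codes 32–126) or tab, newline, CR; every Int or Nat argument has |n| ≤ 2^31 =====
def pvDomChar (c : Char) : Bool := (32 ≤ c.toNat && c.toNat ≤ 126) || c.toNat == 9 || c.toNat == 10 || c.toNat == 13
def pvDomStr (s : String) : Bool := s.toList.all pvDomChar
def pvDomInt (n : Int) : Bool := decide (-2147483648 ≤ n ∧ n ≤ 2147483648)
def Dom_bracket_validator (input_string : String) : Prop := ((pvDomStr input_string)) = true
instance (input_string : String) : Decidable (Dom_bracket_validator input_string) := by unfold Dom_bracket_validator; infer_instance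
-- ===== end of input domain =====

-- B replaces A's push/pop stack scan by repeated cancellation of adjacent matching
-- pairs until a fixpoint (alternative algorithm, not claimed faster).

-- ===== PORT A =====
-- char in "([{"  /  char in ")]}"
def pvIsOpen (c : Char) : Bool := c = '(' || c = '[' || c = '{'
def pvIsClose (c : Char) : Bool := c = ')' || c = ']' || c = '}'
-- bracket_map[char] for char in ")]}" (the dict lookup; char is always a closing bracket here)
def pvBMap (c : Char) : Char := if c = ')' then '(' else if c = ']' then '[' else '{'

-- the for-loop of A: stack (head = Python list's last element) over the remaining chars
def pvARun : List Char → List Char → Bool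
  | stack, [] => stack.isEmpty
  | stack, ch :: rest =>
    if pvIsOpen ch then pvARun (ch :: stack) rest
    else if pvIsClose ch then
      match stack with
      | [] => false
      | top :: st' => if top ≠ pvBMap ch then false else pvARun st' rest
    else pvARun stack rest

def bracket_validator (input_string : String) : Bool := pvARun [] input_string.toList

-- ===== PORT B =====
def pvIsPair (a b : Char) : Bool :=
  (a = '(' && b = ')') || (a = '[' && b = ']') || (a = '{' && b = '}')

def pvIsBracket (c : Char) : Bool :=
  c = '(' || c = ')' || c = '[' || c = ']' || c = '{' || c = '}'

-- collapse: one left-to-right pass removing adjacent matching pairs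
def pvCollapse : List Char → List Char
  | a :: b :: t => if pvIsPair a b then pvCollapse t else a :: pvCollapse (b :: t)
  | s => s

theorem pvCollapse_len_le (s : List Char) : (pvCollapse s).length ≤ s.length := by
  induction s using pvCollapse.induct with
  | case1 a b t h ih => rw [pvCollapse, if_pos h]; simp; omega
  | case2 a b t h ih => rw [pvCollapse, if_neg h]; simp at ih ⊢; omega
  | case3 s h =>
    cases s with
    | nil => simp [pvCollapse]
    | cons a t =>
      cases t with
      | nil => simp [pvCollapse]
      | cons b u => exact absurd rfl (h a b u)

theorem pvCollapse_len_lt (s : List Char) (hne : pvCollapse s ≠ s) :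
    (pvCollapse s).length < s.length := by
  induction s using pvCollapse.induct with
  | case1 a b t h _ => rw [pvCollapse, if_pos h]; have := pvCollapse_len_le t; simp; omega
  | case2 a b t h ih =>
    rw [pvCollapse, if_neg h] at hne ⊢
    have h2 : pvCollapse (b :: t) ≠ b :: t := fun he => hne (by rw [he])
    have := ih h2; simp at this ⊢; omega
  | case3 s h =>
    cases s with
    | nil => exact absurd rfl hne
    | cons a t =>
      cases t with
      | nil => exact absurd rfl hne
      | cons b u => exact absurd rfl (h a b u)

-- the while-True loop of B: iterate collapse until a fixpoint
def pvBLoop (s : List Char) : List Char :=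
  let t := pvCollapse s
  if h : t = s then s else pvBLoop t
termination_by s.length
decreasing_by exact pvCollapse_len_lt s h

def bracket_validator_alt (input_string : String) : Bool :=
  (pvBLoop (input_string.toList.filter pvIsBracket)).isEmpty

-- ===== PRECONDITION & SPEC =====
def Spec_bracket_validator (input_string : String) (out : Bool) : Prop := out = bracket_validator_alt input_string
instance (input_string : String) (out : Bool) : Decidable (Spec_bracket_validator input_string out) := by unfold Spec_bracket_validator; infer_instance

-- ===== CLAIM (what is proved, stated in full; the proofs are below) =====
def Claim_equal_bracket_validator : Prop := ∀ (input_string : String), Dom_bracket_validator input_string → Spec_bracket_validator input_string (bracket_validator input_string)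

-- ===== LEMMAS AND PROOFS =====

-- the effect of a single character on A's stack: none = early `return False`
def pvStep (st : List Char) (a : Char) : Option (List Char) :=
  if pvIsOpen a then some (a :: st)
  else if pvIsClose a then
    match st with
    | [] => none
    | top :: st' => if top ≠ pvBMap a then none else some st'
  else some st

theorem pvARun_cons (st : List Char) (a : Char) (l : List Char) :
    pvARun st (a :: l) = match pvStep st a with
      | none => false
      | some st' => pvARun st' l := by
  by_cases h1 : pvIsOpen a = true
  · simp [pvARun, pvStep, h1]
  · by_cases h2 : pvIsClose a = true
    · cases st with
      | nil => simp [pvARun, pvStep, h1, h2]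
      | cons top st' =>
        by_cases h3 : top = pvBMap a <;> simp [pvARun, pvStep, h1, h2, h3]
    · simp [pvARun, pvStep, h1, h2]

-- a matching pair is transparent to A's run, whatever the stack
theorem pvARun_pair (st : List Char) {a b : Char} (h : pvIsPair a b = true) (l : List Char) :
    pvARun st (a :: b :: l) = pvARun st l := by
  simp only [pvIsPair, Bool.or_eq_true, Bool.and_eq_true, decide_eq_true_eq] at h
  rcases h with (⟨rfl, rfl⟩ | ⟨rfl, rfl⟩) | ⟨rfl, rfl⟩ <;>
    simp [pvARun, pvIsOpen, pvIsClose, pvBMap]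

-- one collapse pass preserves A's verdict
theorem pvARun_collapse (s : List Char) : ∀ st, pvARun st (pvCollapse s) = pvARun st s := by
  induction s using pvCollapse.induct with
  | case1 a b t h ih =>
    intro st
    rw [pvCollapse, if_pos h, ih st, pvARun_pair st h]
  | case2 a b t h ih =>
    intro st
    rw [pvCollapse, if_neg h, pvARun_cons, pvARun_cons]
    cases pvStep st a with
    | none => rfl
    | some st' => exact ih st'
  | case3 s h =>
    cases s with
    | nil => intro st; rfl
    | cons a t =>
      cases t with
      | nil => intro st; rfl
      | cons b u => exact absurd rfl (h a b u)

theorem pvARun_bloop (s : List Char) : ∀ st, pvARun st (pvBLoop s) = pvARun st s := by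
  induction s using pvBLoop.induct with
  | case1 s _t heq => intro st; rw [pvBLoop, dif_pos (show pvCollapse s = s from heq)]
  | case2 s _t hne ih =>
    intro st
    rw [pvBLoop, dif_neg (show ¬ pvCollapse s = s from hne)]
    rw [show pvBLoop _t = pvBLoop (pvCollapse s) from rfl] at ih ⊢
    rw [ih st, pvARun_collapse]

-- the loop's result is a collapse fixpoint
theorem pvBLoop_fix (s : List Char) : pvCollapse (pvBLoop s) = pvBLoop s := by
  induction s using pvBLoop.induct with
  | case1 s _t heq => rw [pvBLoop, dif_pos (show pvCollapse s = s from heq)]; exact heq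
  | case2 s _t hne ih => rw [pvBLoop, dif_neg (show ¬ pvCollapse s = s from hne)]; exact ih

-- collapse only keeps characters of its input
theorem pvCollapse_subset (s : List Char) : ∀ c ∈ pvCollapse s, c ∈ s := by
  induction s using pvCollapse.induct with
  | case1 a b t h ih =>
    intro c hc; rw [pvCollapse, if_pos h] at hc
    exact List.mem_cons_of_mem _ (List.mem_cons_of_mem _ (ih c hc))
  | case2 a b t h ih =>
    intro c hc; rw [pvCollapse, if_neg h, List.mem_cons] at hc
    rcases hc with rfl | hc
    · exact List.mem_cons_self
    · exact List.mem_cons_of_mem _ (ih c hc)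
  | case3 s h =>
    intro c hc
    cases s with
    | nil => simpa [pvCollapse] using hc
    | cons a t =>
      cases t with
      | nil => simpa [pvCollapse] using hc
      | cons b u => exact absurd rfl (h a b u)

theorem pvBLoop_subset (s : List Char) : ∀ c ∈ pvBLoop s, c ∈ s := by
  induction s using pvBLoop.induct with
  | case1 s _t heq => intro c hc; rwa [pvBLoop, dif_pos (show pvCollapse s = s from heq)] at hc
  | case2 s _t hne ih =>
    intro c hc
    rw [pvBLoop, dif_neg (show ¬ pvCollapse s = s from hne)] at hc
    exact pvCollapse_subset s c (ih c hc)

-- on an (open ∷ rest) with no adjacent matching pair and only brackets, A fails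
theorem pvARun_open_fix_false (s : List Char) :
    ∀ st o, pvIsOpen o = true → pvCollapse (o :: s) = o :: s →
      (∀ c ∈ s, pvIsBracket c = true) → pvARun st (o :: s) = false := by
  induction s with
  | nil =>
    intro st o ho _ _
    simp [pvARun, ho]
  | cons c s' ih =>
    intro st o ho hfix hbr
    have hnp : ¬ pvIsPair o c = true := by
      intro h'
      rw [pvCollapse, if_pos h'] at hfix
      have h1 := pvCollapse_len_le s'
      have h2 := congrArg List.length hfix
      simp at h2; omega
    have hfix' : pvCollapse (c :: s') = c :: s' := by
      rw [pvCollapse, if_neg hnp] at hfix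
      exact (List.cons.injEq _ _ _ _ ▸ hfix).2
    have hc : pvIsBracket c = true := hbr c (by simp)
    rw [pvARun_cons]
    have hstep : pvStep st o = some (o :: st) := by simp [pvStep, ho]
    rw [hstep]
    by_cases hco : pvIsOpen c = true
    · exact ih (o :: st) c hco hfix' (fun d hd => hbr d (by simp [hd]))
    · -- c is a closing bracket and, since (o,c) is not a matching pair, it does not close o
      have hcc : pvIsClose c = true := by
        simp only [pvIsBracket, pvIsOpen, pvIsClose, Bool.or_eq_true, decide_eq_true_eq] at hc hco ⊢
        tauto
      have hne : ¬ o = pvBMap c := by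
        simp only [pvIsPair, pvIsOpen, pvIsClose, Bool.or_eq_true, Bool.and_eq_true,
          decide_eq_true_eq] at ho hcc hnp
        rw [not_or, not_or] at hnp
        obtain ⟨⟨hnp1, hnp2⟩, hnp3⟩ := hnp
        rcases hcc with (rfl | rfl) | rfl <;> simp only [pvBMap] <;>
          rcases ho with (rfl | rfl) | rfl <;> simp_all
      show pvARun (o :: st) (c :: s') = false
      rw [pvARun_cons]
      have : pvStep (o :: st) c = none := by
        simp [pvStep, hco, hcc, hne]
      rw [this]

-- on a nonempty collapse-fixpoint made of brackets, A fails
theorem pvARun_fix_false (s : List Char) (hne : s ≠ [])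
    (hfix : pvCollapse s = s) (hbr : ∀ c ∈ s, pvIsBracket c = true) :
    pvARun [] s = false := by
  cases s with
  | nil => exact absurd rfl hne
  | cons a t =>
    by_cases ho : pvIsOpen a = true
    · exact pvARun_open_fix_false t [] a ho hfix (fun c hc => hbr c (by simp [hc]))
    · have ha : pvIsBracket a = true := hbr a (by simp)
      have hc : pvIsClose a = true := by
        simp only [pvIsBracket, pvIsOpen, pvIsClose, Bool.or_eq_true, decide_eq_true_eq] at ha ho ⊢
        tauto
      rw [pvARun_cons]
      have : pvStep [] a = none := by simp [pvStep, ho, hc]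
      rw [this]

-- A's run ignores non-bracket characters
theorem pvARun_filter (l : List Char) : ∀ st, pvARun st (l.filter pvIsBracket) = pvARun st l := by
  induction l with
  | nil => intro st; rfl
  | cons a t ih =>
    intro st
    by_cases hb : pvIsBracket a = true
    · rw [List.filter_cons_of_pos hb, pvARun_cons, pvARun_cons]
      cases pvStep st a with
      | none => rfl
      | some st' => exact ih st'
    · rw [List.filter_cons_of_neg (by simpa using hb), pvARun_cons]
      have ho : pvIsOpen a = false := by
        simp only [pvIsBracket, pvIsOpen, Bool.or_eq_true, decide_eq_true_eq] at hb ⊢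
        simp only [Bool.or_eq_false_iff, decide_eq_false_iff_not]; tauto
      have hc : pvIsClose a = false := by
        simp only [pvIsBracket, pvIsClose, Bool.or_eq_true, decide_eq_true_eq] at hb ⊢
        simp only [Bool.or_eq_false_iff, decide_eq_false_iff_not]; tauto
      have : pvStep st a = some st := by simp [pvStep, ho, hc]
      rw [this]
      exact ih st

-- ===== VERDICT (by name: the statement is the Claim_ definition above) =====
theorem bracket_validator_spec : Claim_equal_bracket_validator := by
  intro s _
  unfold Spec_bracket_validator bracket_validator bracket_validator_alt
  set f := s.toList.filter pvIsBracket with hf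
  have hbr : ∀ c ∈ f, pvIsBracket c = true := fun c hc => (List.mem_filter.mp hc).2
  have h1 : pvARun [] s.toList = pvARun [] (pvBLoop f) := by
    rw [pvARun_bloop, pvARun_filter]
  rw [h1]
  rcases hres : pvBLoop f with _ | ⟨a, t⟩
  · simp [pvARun]
  · have hfix := pvBLoop_fix f
    rw [hres] at hfix
    have hbr' : ∀ c ∈ a :: t, pvIsBracket c = true := by
      intro c hc
      exact hbr c (pvBLoop_subset f c (hres ▸ hc))
    rw [pvARun_fix_false (a :: t) (by simp) hfix hbr']
    simp
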